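-- pv_equiv track=rewrite | github.com/anderssh/advent_of_code_2020 | day_6.py | count_letters_in_all_people_of_group
-- ===== SOURCE A (Python) =====
-- def count_letters_in_all_people_of_group(one_groups_declarations):
--     '''
--     Returns the number of common letters i decleration across all persons in a groups
--     '''
--     the_set = set()
--     one_groups_declarations_list = one_groups_declarations.split(" ")
--     first_declaration = one_groups_declarations_list[0]
--     for letter in first_declaration:
--         the_set.add(letter)
--     for decleration in one_groups_declarations_list:
--         letters_to_be_removed = []
--         for letter in the_set:
--             if letter not in decleration:
--                 letters_to_be_removed.append(letter)
--         for letter in letters_to_be_removed: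
--             the_set.remove(letter)
--     return len(the_set)
-- ===== SOURCE B (Python) =====
-- def count_letters_in_all_people_of_group(one_groups_declarations):
--     '''
--     Returns the number of common letters i decleration across all persons in a groups
--     '''
--     declarations = one_groups_declarations.split(" ")
--     tally = {}
--     for declaration in declarations:
--         for letter in set(declaration):
--             tally[letter] = tally.get(letter, 0) + 1
--     n = len(declarations)
--     return sum(1 for v in tally.values() if v == n)
-- ===== Notes on version B (the rewrite author's own statement) =====
-- stated objective: alternative
-- what changed: Replaces the seed-and-prune set loop (seed from the first declaration, then repeatedly scan the set and remove missing letters) by a single tally pass: count each distinct letter per declaration in a dict, then count the letters whose tally equals the number of declarations.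
import Mathlib
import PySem

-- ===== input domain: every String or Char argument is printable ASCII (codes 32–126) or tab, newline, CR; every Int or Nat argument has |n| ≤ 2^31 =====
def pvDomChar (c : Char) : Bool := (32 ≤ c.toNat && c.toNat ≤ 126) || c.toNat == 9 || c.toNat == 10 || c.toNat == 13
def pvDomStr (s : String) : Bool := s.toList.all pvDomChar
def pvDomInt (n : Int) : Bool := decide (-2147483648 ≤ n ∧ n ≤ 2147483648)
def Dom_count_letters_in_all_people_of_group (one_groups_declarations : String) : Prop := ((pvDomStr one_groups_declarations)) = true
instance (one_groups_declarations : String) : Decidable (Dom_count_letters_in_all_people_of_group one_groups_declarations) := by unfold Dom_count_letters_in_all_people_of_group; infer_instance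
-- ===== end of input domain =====

-- B replaces A's seed-and-prune set loop by a single per-declaration distinct-letter tally plus a
-- threshold filter (letters whose tally equals the number of declarations); same result, alternative algorithm.

-- ===== PORT A =====
-- Python iterates the set and removes elements that are present (no KeyError possible: the removed
-- letters were just collected from the set); set.remove of a present element is Set.discard.
-- The final length does not depend on the (unmodelled) hash iteration order.
-- split(" ") never returns an empty list, so Python's lst[0] never raises; headD [] is exact here.
def count_letters_in_all_people_of_group (one_groups_declarations : String) : Int :=
  let lst := PySem.Chars.splitOn one_groups_declarations.toList [' ']
  let first := lst.headD []
  let theSet := first.foldl (fun s c => PySem.Set.add s c) ([] : PySem.Set Char)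
  let final := lst.foldl (fun st d =>
    let toRemove := st.foldl (fun r c => if !(d.contains c) then r ++ [c] else r) ([] : List Char)
    toRemove.foldl (fun st c => PySem.Set.discard st c) st) theSet
  (final.length : Int)

-- ===== PORT B =====
def count_letters_in_all_people_of_group_alt (one_groups_declarations : String) : Int :=
  let declarations := PySem.Chars.splitOn one_groups_declarations.toList [' ']
  let tally := declarations.foldl (fun t declaration =>
      (PySem.Set.ofList declaration).foldl (fun t letter => t.insert letter (t.getD letter 0 + 1)) t)
    (PySem.Dict.empty : PySem.Dict Char Int)
  let n := declarations.length
  (tally.values.countP (fun v => v == (n : Int)) : Int)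

-- ===== PRECONDITION & SPEC =====
def Spec_count_letters_in_all_people_of_group (one_groups_declarations : String) (out : Int) : Prop := out = count_letters_in_all_people_of_group_alt one_groups_declarations
instance (one_groups_declarations : String) (out : Int) : Decidable (Spec_count_letters_in_all_people_of_group one_groups_declarations out) := by unfold Spec_count_letters_in_all_people_of_group; infer_instance

-- ===== CLAIM (what is proved, stated in full; the proofs are below) =====
def Claim_equal_count_letters_in_all_people_of_group : Prop := ∀ (one_groups_declarations : String), Dom_count_letters_in_all_people_of_group one_groups_declarations → Spec_count_letters_in_all_people_of_group one_groups_declarations (count_letters_in_all_people_of_group one_groups_declarations)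

-- ===== LEMMAS AND PROOFS =====

-- folding Set.discard over a list of letters filters them all out
theorem pv_foldl_discard (r st : List Char) :
    r.foldl (fun st c => PySem.Set.discard st c) st = st.filter (fun c => !(r.contains c)) := by
  induction r generalizing st with
  | nil => simp
  | cons a r ih =>
      rw [List.foldl_cons, ih]
      show (PySem.Set.discard st a).filter _ = _
      simp only [PySem.Set.discard, List.filter_filter]
      apply List.filter_congr
      intro c _
      by_cases h1 : a = c
      · subst h1; simp
      · by_cases h2 : c ∈ r <;>
          simp [h2, Ne.symm h1]

-- one pass of A's pruning loop keeps exactly the letters of d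
theorem pv_prune_step (st : List Char) (d : List Char) :
    (st.foldl (fun r c => if !(d.contains c) then r ++ [c] else r) ([] : List Char)).foldl
      (fun st c => PySem.Set.discard st c) st = st.filter (fun c => d.contains c) := by
  have h := PySem.List.foldl_append_if (fun c => !(d.contains c)) (fun c : Char => c) st []
  simp only [h, List.nil_append, List.map_id', pv_foldl_discard]
  apply List.filter_congr
  intro c hc
  by_cases hd : d.contains c = true
  · have h2 : (st.filter (fun c => !(d.contains c))).contains c = false := by
      simp [List.mem_filter]
      exact fun _ => List.contains_iff_mem.mp hd
    rw [h2, hd]; rfl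
  · have h2 : (st.filter (fun c => !(d.contains c))).contains c = true := by
      simp [List.mem_filter, hc]
      exact fun hm => hd (List.contains_iff_mem.mpr hm)
    rw [h2]
    cases hdc : d.contains c
    · rfl
    · exact absurd hdc hd

-- A's whole loop filters the seed set by membership in every declaration
theorem pv_prune_loop (decls : List (List Char)) (st : List Char) :
    decls.foldl (fun st d =>
      (st.foldl (fun r c => if !(d.contains c) then r ++ [c] else r) ([] : List Char)).foldl
        (fun st c => PySem.Set.discard st c) st) st
    = st.filter (fun c => decls.all (fun d => d.contains c)) := by
  induction decls generalizing st with
  | nil => simp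
  | cons f rest ih =>
      rw [List.foldl_cons, ih, pv_prune_step, List.filter_filter]
      apply List.filter_congr
      intro c _
      simp [List.all_cons, Bool.and_comm]

-- counting c across the distinct letters of each declaration counts the declarations containing c
theorem pv_count_flat (decls : List (List Char)) (c : Char) :
    (decls.flatMap (fun d => PySem.Set.ofList d)).count c
      = decls.countP (fun d => d.contains c) := by
  induction decls with
  | nil => simp
  | cons d rest ih =>
      rw [List.flatMap_cons, List.count_append, ih, List.countP_cons]
      by_cases hc : c ∈ d
      · rw [List.count_eq_one_of_mem (PySem.Set.nodup_ofList d)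
          ((PySem.Set.mem_ofList d c).mpr hc)]
        simp [hc]
        omega
      · rw [List.count_eq_zero_of_not_mem (fun hm => hc ((PySem.Set.mem_ofList d c).mp hm))]
        simp [hc]

-- the core equality, over an arbitrary split result
theorem pv_main (decls : List (List Char)) :
    (((PySem.Set.ofList (decls.headD [])).filter
        (fun c => decls.all (fun d => d.contains c))).length : Int)
    = (((decls.flatMap (fun d => PySem.Set.ofList d)).foldl
          (fun (t : PySem.Dict Char Int) letter => t.insert letter (t.getD letter 0 + 1))
          PySem.Dict.empty).values.countP (fun v => v == (decls.length : Int)) : Int) := by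
  rw [PySem.Dict.foldl_insert_getD_add_one_eq_counter]
  set all := decls.flatMap (fun d => PySem.Set.ofList d) with hall
  have hv : (PySem.Dict.counter all).values
      = (PySem.Set.ofList all).map (fun k => ((all.count k : Int))) := by
    show ((PySem.Dict.counter all).items).map Prod.snd = _
    rw [PySem.Dict.items_counter]
    simp
  rw [hv, List.countP_map]
  have hQ : ∀ c : Char, ((fun v : Int => v == (decls.length : Int)) ∘
        (fun k => ((all.count k : Int)))) c
      = decls.all (fun d => d.contains c) := by
    intro c
    rw [Bool.eq_iff_iff]
    simp only [Function.comp, beq_iff_eq, Nat.cast_inj, List.all_eq_true, hall,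
      pv_count_flat]
    exact List.countP_eq_length
  rw [List.countP_eq_length_filter]
  have hfc : (PySem.Set.ofList all).filter ((fun v : Int => v == (decls.length : Int)) ∘
        (fun k => ((all.count k : Int))))
      = (PySem.Set.ofList all).filter (fun c => decls.all (fun d => d.contains c)) :=
    List.filter_congr (fun c _ => hQ c)
  rw [hfc]
  congr 1
  apply List.Perm.length_eq
  rw [List.perm_ext_iff_of_nodup
    ((PySem.Set.nodup_ofList _).filter _) ((PySem.Set.nodup_ofList _).filter _)]
  intro c
  simp only [List.mem_filter, PySem.Set.mem_ofList, hall, List.mem_flatMap]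
  cases decls with
  | nil => simp
  | cons f rest =>
      simp only [List.headD_cons]
      constructor
      · rintro ⟨hcf, hall'⟩
        exact ⟨⟨f, by simp, hcf⟩, hall'⟩
      · rintro ⟨⟨d, hd, hcd⟩, hall'⟩
        refine ⟨?_, hall'⟩
        have := (List.all_eq_true.mp hall') f (by simp)
        exact List.contains_iff_mem.mp this

-- ===== VERDICT (by name: the statement is the Claim_ definition above) =====
theorem count_letters_in_all_people_of_group_spec : Claim_equal_count_letters_in_all_people_of_group := by
  intro s _
  show count_letters_in_all_people_of_group s = count_letters_in_all_people_of_group_alt s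
  unfold count_letters_in_all_people_of_group count_letters_in_all_people_of_group_alt
  simp only [pv_prune_loop, List.foldl_flatMap.symm]
  rw [show (fun (s : PySem.Set Char) (c : Char) => PySem.Set.add s c) = PySem.Set.add from rfl,
    ← PySem.Set.ofList_eq_foldl]
  exact pv_main (PySem.Chars.splitOn s.toList [' '])
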